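-- pv_equiv track=rewrite | github.com/Xamilceht2/PPM-THING | main.py | row_from_list
-- ===== SOURCE A (Python) =====
-- def row_from_list(row):
--     '''
--     gets a list (row) from file turning the list into a list of lists of pixels (r,b,g)
--     input: row list
--     output: lists of pixel lists
--     '''
--     counter = 0
--     new_row = []
--     pixel = []
--     for value in row:
--         counter += 1
--         pixel.append(value)
--         if counter >= 3:
--             new_row.append(pixel)
--             counter = 0
--             pixel = []
--     return new_row
-- ===== SOURCE B (Python) =====
-- def row_from_list(row):
--     n = len(row) // 3
--     return [row[3 * k : 3 * k + 3] for k in range(n)]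
-- ===== Notes on version B (the rewrite author's own statement) =====
-- stated objective: idiomatic
-- what changed: B computes chunk boundaries by index and slices row[3k:3k+3] in a comprehension over range(len(row)//3), replacing A's per-element counter-and-buffer accumulation.
import Mathlib
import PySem

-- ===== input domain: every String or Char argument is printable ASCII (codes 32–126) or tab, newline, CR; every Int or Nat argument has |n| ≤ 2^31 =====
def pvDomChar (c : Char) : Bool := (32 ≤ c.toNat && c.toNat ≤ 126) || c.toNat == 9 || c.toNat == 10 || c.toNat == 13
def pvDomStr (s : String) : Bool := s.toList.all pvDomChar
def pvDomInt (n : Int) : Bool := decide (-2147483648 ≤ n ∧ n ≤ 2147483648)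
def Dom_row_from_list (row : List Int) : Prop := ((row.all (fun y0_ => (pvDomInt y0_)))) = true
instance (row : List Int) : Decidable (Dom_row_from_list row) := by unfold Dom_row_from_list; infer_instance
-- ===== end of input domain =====

-- B chunks by index-stepped slices instead of A's counter-and-buffer accumulation (idiomatic; same cost).

-- ===== PORT A =====
def row_from_list (row : List Int) : List (List Int) :=
  (row.foldl
    (fun (st : Int × List (List Int) × List Int) value =>
      let counter := st.1 + 1
      let pixel := st.2.2 ++ [value]
      if counter ≥ 3 then (0, st.2.1 ++ [pixel], ([] : List Int))
      else (counter, st.2.1, pixel))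
    (0, [], [])).2.1

-- ===== PORT B =====
def row_from_list_alt (row : List Int) : List (List Int) :=
  let n := PySem.Int.floordiv (row.length : Int) 3
  (PySem.List.pyRange 0 n 1).map
    (fun k => PySem.List.slice row (some (3 * k)) (some (3 * k + 3)))

-- ===== PRECONDITION & SPEC =====
def Spec_row_from_list (row : List Int) (out : List (List Int)) : Prop := out = row_from_list_alt row
instance (row : List Int) (out : List (List Int)) : Decidable (Spec_row_from_list row out) := by unfold Spec_row_from_list; infer_instance

-- ===== CLAIM (what is proved, stated in full; the proofs are below) =====
def Claim_equal_row_from_list : Prop := ∀ (row : List Int), Dom_row_from_list row → Spec_row_from_list row (row_from_list row)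

-- ===== LEMMAS AND PROOFS =====

/-- Reference chunking: groups of three, remainder dropped. -/
def pvChunk3 : List Int → List (List Int)
  | a :: b :: c :: rest => [a, b, c] :: pvChunk3 rest
  | _ => []

theorem pvFoldA : ∀ (row : List Int) (acc : List (List Int)),
    (row.foldl
      (fun (st : Int × List (List Int) × List Int) value =>
        let counter := st.1 + 1
        let pixel := st.2.2 ++ [value]
        if counter ≥ 3 then (0, st.2.1 ++ [pixel], ([] : List Int))
        else (counter, st.2.1, pixel))
      (0, acc, [])).2.1 = acc ++ pvChunk3 row
  | [], acc => by simp [pvChunk3]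
  | [a], acc => by norm_num [pvChunk3, List.foldl]
  | [a, b], acc => by norm_num [pvChunk3, List.foldl]

  | a :: b :: c :: rest, acc => by
      have ih := pvFoldA rest (acc ++ [[a, b, c]])
      simp only [List.foldl] at ih ⊢
      norm_num at ih ⊢
      rw [ih, pvChunk3]

theorem pvAltChunk : ∀ (row : List Int), row_from_list_alt row = pvChunk3 row
  | [] => by simp [row_from_list_alt, pvChunk3]
  | [a] => by simp [row_from_list_alt, pvChunk3]
  | [a, b] => by simp [row_from_list_alt, pvChunk3]
  | a :: b :: c :: rest => by
      have ih := pvAltChunk rest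
      simp only [row_from_list_alt, pvChunk3] at ih ⊢
      rw [List.length_cons, List.length_cons, List.length_cons]
      have hfd : PySem.Int.floordiv ((rest.length + 1 + 1 + 1 : Nat) : Int) 3
          = PySem.Int.floordiv ((rest.length : Nat) : Int) 3 + 1 := by
        rw [PySem.Int.floordiv_eq_ediv_of_pos (by norm_num),
            PySem.Int.floordiv_eq_ediv_of_pos (by norm_num)]
        push_cast
        omega
      rw [hfd]
      rw [PySem.List.pyRange_one] at ih ⊢
      rw [List.map_map] at ih ⊢
      have htn : ((PySem.Int.floordiv ((rest.length : Nat) : Int) 3 + 1) - 0).toNat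
          = ((PySem.Int.floordiv ((rest.length : Nat) : Int) 3 - 0).toNat) + 1 := by
        rw [PySem.Int.floordiv_eq_ediv_of_pos (by norm_num)]
        have : (0:Int) ≤ (rest.length : Int) / 3 := by positivity
        omega
      rw [htn, List.range_succ_eq_map, List.map_cons, List.map_map]
      congr 1    -- the head group row[0:3] = [a,b,c] is closed definitionally
      rw [PySem.Int.floordiv_eq_ediv_of_pos (by norm_num)] at ih
      norm_num [Function.comp] at ih ⊢
      rw [← ih]
      apply List.map_congr_left
      intro k _
      show PySem.List.slice (a :: b :: c :: rest) (some (3 * ((k + 1 : Nat) : Int)))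
            (some (3 * ((k + 1 : Nat) : Int) + 3))
          = PySem.List.slice rest (some (3 * (k : Int))) (some (3 * (k : Int) + 3))
      have h1 : (3 : Int) * (↑(k + 1) : Int) = 3 * (k : Int) + 3 := by push_cast; ring
      rw [h1]
      rw [PySem.List.slice_toNat (ha := by omega) (hb := by omega),
          PySem.List.slice_toNat (ha := by omega) (hb := by omega)]
      have e1 : ((3 * (k:Int) + 3).toNat) = 3 * k + 3 := by omega
      have e2 : ((3 * (k:Int) + 3 + 3).toNat) = 3 * k + 6 := by omega
      have e3 : ((3 * (k:Int)).toNat) = 3 * k := by omega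
      rw [e1, e2, e3]
      have hdrop : (a :: b :: c :: rest).drop (3 * k + 3) = rest.drop (3 * k) := by
        simp [List.drop_succ_cons]
      rw [hdrop]
      congr 1
      omega

-- ===== VERDICT (by name: the statement is the Claim_ definition above) =====
theorem row_from_list_spec : Claim_equal_row_from_list := by
  intro row _
  unfold Spec_row_from_list row_from_list
  rw [pvFoldA row [], pvAltChunk row]
  simp
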